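-- pv_equiv track=rewrite | github.com/Zeqiang-Lai/Prosody_Prediction | inference/predict.py | concate
-- ===== SOURCE A (Python) =====
-- def concate(words, tags):
--     assert len(words) == len(tags)
--
--     cat = []
--     s = ''
--     for i in range(len(tags)):
--         if tags[i] == 'B':
--             cat.append(s)
--             s = '' + words[i]
--         else:
--             s += words[i]
--     cat.append(s)
--     return cat[1:]
-- ===== SOURCE B (Python) =====
-- def concate(words, tags):
--     out = []
--     parts = []
--     for w, t in zip(reversed(words), reversed(tags)):
--         parts.append(w)
--         if t == 'B':
--             parts.reverse()
--             out.append(''.join(parts))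
--             parts = []
--     out.reverse()
--     return out
-- ===== Notes on version B (the rewrite author's own statement) =====
-- stated objective: alternative
-- what changed: B replaces A's forward index loop with append-then-drop-first-group by a single backward pass (over the reversed zip) that accumulates each group from its last word up to its 'B' word and flushes it, so the pre-first-'B' prefix is simply never flushed and no leading dummy element is created and dropped.
import Mathlib
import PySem

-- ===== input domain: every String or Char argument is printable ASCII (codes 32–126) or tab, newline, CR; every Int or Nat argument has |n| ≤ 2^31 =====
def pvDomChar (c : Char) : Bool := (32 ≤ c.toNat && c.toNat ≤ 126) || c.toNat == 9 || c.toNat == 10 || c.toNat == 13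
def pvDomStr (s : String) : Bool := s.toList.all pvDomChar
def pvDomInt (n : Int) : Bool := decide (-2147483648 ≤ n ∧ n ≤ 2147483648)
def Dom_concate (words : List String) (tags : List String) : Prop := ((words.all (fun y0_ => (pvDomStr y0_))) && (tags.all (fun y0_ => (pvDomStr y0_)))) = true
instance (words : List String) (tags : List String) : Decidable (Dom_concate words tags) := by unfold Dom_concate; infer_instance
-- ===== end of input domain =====

-- B groups the words in one backward pass (collect each group's words from the end, join and flush at 'B'),
-- instead of A's forward loop that appends a dummy leading group and drops it; same cost, different decomposition.

-- ===== PORT A =====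
-- the 'assert len(words) == len(tags)' is carried by Pre_concate (A raises AssertionError otherwise)
def concate (words : List String) (tags : List String) : List String :=
  let st := (PySem.List.pyRange 0 (PySem.List.len tags) 1).foldl
    (fun (p : List String × String) i =>
      if PySem.List.pyGetD tags i "" = "B" then
        (p.1 ++ [p.2], "" ++ PySem.List.pyGetD words i "")
      else
        (p.1, p.2 ++ PySem.List.pyGetD words i "")) ([], "")
  PySem.List.slice (st.1 ++ [st.2]) (some 1) none

-- ===== PORT B =====
def concate_alt (words : List String) (tags : List String) : List String :=
  let st := (words.reverse.zip tags.reverse).foldl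
    (fun (p : List String × List String) wt =>
      let parts := p.2 ++ [wt.1]
      if wt.2 = "B" then (p.1 ++ [PySem.Str.join "" parts.reverse], []) else (p.1, parts))
    ([], [])
  st.1.reverse

-- ===== PRECONDITION & SPEC =====
-- Pre_ excludes exactly the inputs where A's assert raises AssertionError (unequal lengths)
def Pre_concate (words : List String) (tags : List String) : Prop :=
  words.length = tags.length
instance (words : List String) (tags : List String) : Decidable (Pre_concate words tags) := by unfold Pre_concate; infer_instance

def pvWitness_concate : List String × List String := (["abc", "de", "f"], ["B", "I", "B"])

def Spec_concate (words : List String) (tags : List String) (out : List String) : Prop := out = concate_alt words tags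
instance (words : List String) (tags : List String) (out : List String) : Decidable (Spec_concate words tags out) := by unfold Spec_concate; infer_instance

-- ===== CLAIM (what is proved, stated in full; the proofs are below) =====
def Claim_equal_concate : Prop := ∀ (words : List String) (tags : List String), Dom_concate words tags → Pre_concate words tags → Spec_concate words tags (concate words tags)

-- ===== LEMMAS AND PROOFS =====

-- reference recursion: pvG pairs = (groups starting at each 'B', unflushed prefix before the first 'B' as a string)
def pvG : List (String × String) → List String × String
  | [] => ([], "")
  | (w, t) :: r =>
    let p := pvG r
    if t = "B" then ((w ++ p.2) :: p.1, "") else (p.1, w ++ p.2)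

-- same recursion with the pending group kept as B's list of reversed-order parts
def pvG2 : List (String × String) → List String × List String
  | [] => ([], [])
  | (w, t) :: r =>
    let p := pvG2 r
    if t = "B" then (PySem.Str.join "" ((p.2 ++ [w]).reverse) :: p.1, []) else (p.1, p.2 ++ [w])

theorem pv_join_cons (a : String) (l : List String) :
    PySem.Str.join "" (a :: l) = a ++ PySem.Str.join "" l := by
  cases l with
  | nil => simp [PySem.Str.join, PySem.Chars.join_singleton, PySem.Chars.join_nil]
  | cons b r =>
    have h : (PySem.Str.join "" (a :: b :: r)).toList = (a ++ PySem.Str.join "" (b :: r)).toList := by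
      simp [PySem.Str.join, PySem.Chars.join_cons_cons]
    exact String.toList_inj.mp h

theorem pv_join_nil : PySem.Str.join "" ([] : List String) = "" := by rfl

theorem pvG2_eq_pvG : ∀ pairs : List (String × String),
    (pvG2 pairs).1 = (pvG pairs).1 ∧ PySem.Str.join "" (pvG2 pairs).2.reverse = (pvG pairs).2 := by
  intro pairs
  induction pairs with
  | nil => exact ⟨rfl, pv_join_nil⟩
  | cons wt r ih =>
    obtain ⟨w, t⟩ := wt
    obtain ⟨ih1, ih2⟩ := ih
    by_cases ht : t = "B"
    · refine ⟨?_, ?_⟩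
      · simp [pvG2, pvG, ht, ih1, List.reverse_append, pv_join_cons, ih2]
      · simp [pvG2, pvG, ht, pv_join_nil]
    · refine ⟨?_, ?_⟩
      · simp [pvG2, pvG, ht, ih1]
      · simp [pvG2, pvG, ht, List.reverse_append, pv_join_cons, ih2]

-- zip of reverses (equal lengths) is reverse of zip
theorem pv_zip_reverse {α β : Type} : ∀ (ws : List α) (ts : List β), ws.length = ts.length →
    ws.reverse.zip ts.reverse = (ws.zip ts).reverse := by
  intro ws
  induction ws with
  | nil => intro ts h; cases ts with
    | nil => rfl
    | cons b ts' => simp at h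
  | cons a ws' ih =>
    intro ts h
    cases ts with
    | nil => simp at h
    | cons b ts' =>
      simp only [List.length_cons, Nat.add_right_cancel_iff] at h
      simp only [List.reverse_cons, List.zip_cons_cons, List.reverse_cons]
      rw [List.zip_append (by simp [h]), ih ts' h]
      simp

-- B's backward foldr state equals (reversed groups, pending parts) of pvG2
theorem pv_B_char : ∀ (pairs : List (String × String)),
    pairs.foldr (fun wt (p : List String × List String) =>
        if wt.2 = "B" then (p.1 ++ [PySem.Str.join "" ((p.2 ++ [wt.1]).reverse)], [])
        else (p.1, p.2 ++ [wt.1])) ([], [])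
      = ((pvG2 pairs).1.reverse, (pvG2 pairs).2) := by
  intro pairs
  induction pairs with
  | nil => rfl
  | cons wt r ih =>
    obtain ⟨w, t⟩ := wt
    simp only [List.foldr_cons, ih, pvG2]
    by_cases ht : t = "B" <;> simp [ht]

-- A's forward foldl in terms of pvG
theorem pv_A_char : ∀ (pairs : List (String × String)) (cat : List String) (s : String),
    (pairs.foldl (fun (p : List String × String) wt =>
        if wt.2 = "B" then (p.1 ++ [p.2], "" ++ wt.1) else (p.1, p.2 ++ wt.1)) (cat, s))
      = (cat ++ ((s ++ (pvG pairs).2) :: (pvG pairs).1).dropLast,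
         (((s ++ (pvG pairs).2) :: (pvG pairs).1).getLast (by simp)) ) := by
  intro pairs
  induction pairs with
  | nil => intro cat s; simp [pvG]
  | cons wt r ih =>
    intro cat s
    obtain ⟨w, t⟩ := wt
    by_cases ht : t = "B"
    · simp only [List.foldl_cons, ht, ih, pvG]
      simp [String.empty_append]
    · simp only [List.foldl_cons, ht, ih, pvG]
      simp [String.append_assoc]

-- index loop over range(len ts) with getD equals loop over the zip, when lengths agree
theorem pv_range_zip {σ : Type} (f : σ → String → String → σ) :
    ∀ (ts ws : List String), ws.length = ts.length → ∀ (init : σ),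
    (List.range ts.length).foldl (fun p k => f p (ws.getD k "") (ts.getD k "")) init
      = (ws.zip ts).foldl (fun p wt => f p wt.1 wt.2) init := by
  intro ts
  induction ts with
  | nil => intro ws h init; cases ws with
    | nil => rfl
    | cons a ws' => simp at h
  | cons t ts' ih =>
    intro ws h init
    cases ws with
    | nil => simp at h
    | cons w ws' =>
      simp only [List.length_cons, Nat.add_right_cancel_iff] at h
      rw [List.length_cons, List.range_succ_eq_map, List.foldl_cons, List.foldl_map]
      simp only [List.getD_cons_zero, List.getD_cons_succ, List.zip_cons_cons, List.foldl_cons]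
      exact ih ws' h _

-- ===== VERDICT (by name: the statement is the Claim_ definition above) =====
theorem concate_spec : Claim_equal_concate := by
  intro words tags _ hpre
  unfold Spec_concate concate concate_alt
  rw [pv_zip_reverse words tags hpre, List.foldl_reverse]
  have hB := pv_B_char (words.zip tags)
  simp only [] at hB
  rw [hB]
  rw [PySem.List.slice_from_one]
  rw [PySem.List.pyRange_one]
  simp only [PySem.List.len_eq, Int.sub_zero, Int.toNat_natCast, List.foldl_map]
  simp only [Int.zero_add, PySem.List.pyGetD_natCast]
  rw [pv_range_zip (fun p w t => if t = "B" then (p.1 ++ [p.2], "" ++ w) else (p.1, p.2 ++ w))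
        tags words hpre ([], "")]
  rw [pv_A_char (words.zip tags) [] ""]
  simp [List.dropLast_append_getLast, (pvG2_eq_pvG (words.zip tags)).1]
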